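-- pv_equiv track=rewrite | github.com/pocaguirre/MATESC | src/main.py | compare_without_spaces
-- ===== SOURCE A (Python) =====
-- def compare_without_spaces(text1, text2):
--     """
--     Given two strings, delete the spaces and compare them
--
--     :param text1: string1
--     :type text1: str
--     :param text2: string2
--     :type text2: str
--     :return: True if they are equal, else False
--     :rtype: bool
--     """
--     text1_spaceless = ""
--     text2_spaceless = ""
--     for char in text1:
--         if char and char != " ":
--             text1_spaceless += char
--     for char in text2:
--         if char and char != " ":
--             text2_spaceless += char
--     return text1_spaceless == text2_spaceless
-- ===== SOURCE B (Python) =====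
-- def compare_without_spaces(text1, text2):
--     """Two-pointer single-pass comparison, skipping spaces; builds no strings."""
--     i, j = 0, 0
--     n1, n2 = len(text1), len(text2)
--     while True:
--         while i < n1 and text1[i] == " ":
--             i += 1
--         while j < n2 and text2[j] == " ":
--             j += 1
--         if i == n1 and j == n2:
--             return True
--         if i == n1 or j == n2:
--             return False
--         if text1[i] != text2[j]:
--             return False
--         i += 1
--         j += 1
-- ===== Notes on version B (the rewrite author's own statement) =====
-- stated objective: faster
-- what changed: B compares the two strings in one interleaved two-pointer pass that skips spaces in place, instead of building two new spaceless strings via repeated += and comparing them.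
import Mathlib
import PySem

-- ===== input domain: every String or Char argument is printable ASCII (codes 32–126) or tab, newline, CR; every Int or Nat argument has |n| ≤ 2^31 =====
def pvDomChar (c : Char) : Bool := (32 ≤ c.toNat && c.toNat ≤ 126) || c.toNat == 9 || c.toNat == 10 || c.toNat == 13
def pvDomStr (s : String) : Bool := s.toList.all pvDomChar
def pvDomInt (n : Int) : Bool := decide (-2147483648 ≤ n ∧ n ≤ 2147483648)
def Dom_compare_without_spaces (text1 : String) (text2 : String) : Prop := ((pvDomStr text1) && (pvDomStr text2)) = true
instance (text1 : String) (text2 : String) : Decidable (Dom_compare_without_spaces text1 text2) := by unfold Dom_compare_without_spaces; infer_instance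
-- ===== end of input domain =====

-- B replaces A's build-two-spaceless-strings-and-compare with a one-pass two-pointer
-- comparison that skips spaces in place (alternative decomposition, O(1) extra space).

-- ===== PORT A =====
-- Python: for char in text1: if char and char != " ": text1_spaceless += char
-- ('char' is a one-character string, always truthy, so the test is char != " ").
def compare_without_spaces (text1 : String) (text2 : String) : Bool :=
  let text1_spaceless :=
    text1.toList.foldl (fun acc c => if c ≠ ' ' then acc.push c else acc) ""
  let text2_spaceless :=
    text2.toList.foldl (fun acc c => if c ≠ ' ' then acc.push c else acc) ""
  text1_spaceless == text2_spaceless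

-- ===== PORT B =====
-- Source B's while-loop with cursors i, j becomes recursion on the two character lists:
-- skip a leading space on either side, then compare heads / ends.
def cwsGo : List Char → List Char → Bool
  | ' ' :: xs, ys => cwsGo xs ys
  | xs, ' ' :: ys => cwsGo xs ys
  | [], [] => true
  | [], _ :: _ => false
  | _ :: _, [] => false
  | x :: xs, y :: ys => if x ≠ y then false else cwsGo xs ys
termination_by xs ys => xs.length + ys.length
decreasing_by all_goals (simp; try omega)

def compare_without_spaces_alt (text1 : String) (text2 : String) : Bool :=
  cwsGo text1.toList text2.toList

-- ===== PRECONDITION & SPEC =====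
def Spec_compare_without_spaces (text1 : String) (text2 : String) (out : Bool) : Prop := out = compare_without_spaces_alt text1 text2
instance (text1 : String) (text2 : String) (out : Bool) : Decidable (Spec_compare_without_spaces text1 text2 out) := by unfold Spec_compare_without_spaces; infer_instance

-- ===== CLAIM (what is proved, stated in full; the proofs are below) =====
def Claim_equal_compare_without_spaces : Prop := ∀ (text1 : String) (text2 : String), Dom_compare_without_spaces text1 text2 → Spec_compare_without_spaces text1 text2 (compare_without_spaces text1 text2)

-- ===== LEMMAS AND PROOFS =====

theorem cwsGo_eq_filter : ∀ (xs ys : List Char),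
    cwsGo xs ys = (xs.filter (· ≠ ' ') == ys.filter (· ≠ ' ')) := by
  intro xs ys
  fun_induction cwsGo xs ys <;> simp_all

theorem spaceless_data : ∀ (l : List Char) (acc : String),
    (l.foldl (fun acc c => if c = ' ' then acc else acc.push c) acc).toList
      = acc.toList ++ l.filter (fun x => !decide (x = ' ')) := by
  intro l
  induction l with
  | nil => intro acc; simp [List.foldl]
  | cons c l ih =>
      intro acc
      by_cases h : c = ' ' <;> simp [List.foldl, h, ih]

-- ===== VERDICT (by name: the statement is the Claim_ definition above) =====
theorem compare_without_spaces_spec : Claim_equal_compare_without_spaces := by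
  intro text1 text2 _
  unfold Spec_compare_without_spaces compare_without_spaces compare_without_spaces_alt
  rw [cwsGo_eq_filter]
  have key : ∀ (a b : String), (a == b) = (a.toList == b.toList) := by
    intro a b
    rw [Bool.eq_iff_iff]
    simp [String.toList_inj]
  rw [key]
  simp only [ne_eq, ite_not]
  rw [spaceless_data, spaceless_data]
  simp
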